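-- pv_equiv track=rewrite | github.com/pyinsteon/pyinsteon | pyinsteon/protocol/messages/user_data.py | _dict_to_dict
-- ===== SOURCE A (Python) =====
-- def _dict_to_dict(empty, user_data):
--     if isinstance(user_data, dict):
--         for key in user_data:
--             if key in [
--                 "d1",
--                 "d2",
--                 "d3",
--                 "d4",
--                 "d5",
--                 "d6",
--                 "d7",
--                 "d8",
--                 "d9",
--                 "d10",
--                 "d11",
--                 "d12",
--                 "d13",
--                 "d14",
--             ]:
--                 empty[key] = user_data[key]
--     return empty
-- ===== SOURCE B (Python) =====
-- # B: instead of filtering user_data against a 14-element whitelist list, decode the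
-- # key shape arithmetically in O(1) ('d'+digit 1-9, or 'd1'+digit 0-4) and build the
-- # result by pruning a copy of user_data and merging it into `empty` with one update.
-- def _is_dn(key):
--     # exact shape test for the keys "d1".."d14"
--     if len(key) == 2:
--         return key[0] == "d" and "1" <= key[1] <= "9"
--     if len(key) == 3:
--         return key[0] == "d" and key[1] == "1" and "0" <= key[2] <= "4"
--     return False
--
--
-- def _dict_to_dict(empty, user_data):
--     if isinstance(user_data, dict):
--         pruned = dict(user_data)
--         for key in list(pruned):
--             if not _is_dn(key):
--                 del pruned[key]
--         empty.update(pruned)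
--     return empty
-- ===== Notes on version B (the rewrite author's own statement) =====
-- stated objective: alternative
-- what changed: B replaces A's per-key scan of a 14-element whitelist list by an O(1) arithmetic shape test of the key ('d'+digit 1-9 or 'd1'+digit 0-4) and builds the result by pruning a copy of user_data by in-place deletion and merging it into empty with a single dict.update, instead of A's test-and-insert loop.
import Mathlib
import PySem

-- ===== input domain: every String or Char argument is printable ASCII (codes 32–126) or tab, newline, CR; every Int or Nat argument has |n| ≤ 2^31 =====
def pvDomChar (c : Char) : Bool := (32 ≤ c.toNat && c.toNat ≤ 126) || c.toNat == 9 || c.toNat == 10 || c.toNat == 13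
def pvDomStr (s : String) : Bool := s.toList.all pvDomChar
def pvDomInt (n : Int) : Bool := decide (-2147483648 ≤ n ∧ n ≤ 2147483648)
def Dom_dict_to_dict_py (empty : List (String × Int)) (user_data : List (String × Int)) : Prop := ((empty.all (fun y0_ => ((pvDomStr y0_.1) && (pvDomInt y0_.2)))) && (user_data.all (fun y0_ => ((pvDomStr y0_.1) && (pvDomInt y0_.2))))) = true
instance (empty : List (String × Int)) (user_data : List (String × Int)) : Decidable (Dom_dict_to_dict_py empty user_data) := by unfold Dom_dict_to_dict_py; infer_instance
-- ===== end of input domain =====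

-- B replaces A's per-key whitelist-list membership loop by an O(1) arithmetic shape test for
-- "d1".."d14" and builds the result by pruning a copy of user_data and merging it into `empty`
-- with one update (alternative; in Python both mutate `empty` in place identically — the
-- theorem is about the returned dict).


-- ===== PORT A =====
-- A's whitelist literal, as written inline in the Python `if key in [...]` test.
def pvWhitelist : List String :=
  ["d1", "d2", "d3", "d4", "d5", "d6", "d7", "d8", "d9", "d10", "d11", "d12", "d13", "d14"]

-- `isinstance(user_data, dict)` is always True under the type convention (user_data IS a dict),
-- so A's guarded body always runs.  `for key in user_data` walks the dict's keys in order;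
-- `user_data[key]` cannot raise since key is drawn from the keys, so `getD key 0` is exact there.
def dict_to_dict_py (empty : List (String × Int)) (user_data : List (String × Int)) : List (String × Int) :=
  ((PySem.Dict.mk user_data).keys.foldl
    (fun d key =>
      if key ∈ pvWhitelist then d.insert key ((PySem.Dict.mk user_data).getD key 0) else d)
    (PySem.Dict.mk empty)).items

-- ===== PORT B =====
-- Source B's `_is_dn`: the Python `len`/indexing/char-comparison tests, step for step.  After the
-- length test the indices 0/1/2 are in range, so `pyGet?` is `some`; the `none` match arms are
-- unreachable (Python never raises here).  Python's `<=` on 1-char strings is Char `≤`.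
def pvIsDn (key : String) : Bool :=
  let n := PySem.Str.len key
  if n = 2 then
    match PySem.Str.pyGet? key 0, PySem.Str.pyGet? key 1 with
    | some a, some b => a == 'd' && decide ('1' ≤ b) && decide (b ≤ '9')
    | _, _ => false
  else if n = 3 then
    match PySem.Str.pyGet? key 0, PySem.Str.pyGet? key 1, PySem.Str.pyGet? key 2 with
    | some a, some b, some c => a == 'd' && b == '1' && decide ('0' ≤ c) && decide (c ≤ '4')
    | _, _, _ => false
  else false

-- `pruned = dict(user_data)`; `for key in list(pruned): if not _is_dn(key): del pruned[key]`;
-- `empty.update(pruned)`.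
def dict_to_dict_py_alt (empty : List (String × Int)) (user_data : List (String × Int)) : List (String × Int) :=
  let pruned := (PySem.Dict.mk user_data).keys.foldl
    (fun d key => if pvIsDn key then d else d.erase key)
    (PySem.Dict.mk user_data)
  ((PySem.Dict.mk empty).update pruned.items).items

-- ===== PRECONDITION & SPEC =====
-- Pre_ excludes association lists whose user_data part has duplicate keys: such a list represents
-- no Python dict (every Python call site passes a real dict, whose keys are distinct), and A's
-- first-match lookup vs B's last-wins duplicate handling are both accidental there.
def Pre_dict_to_dict_py (empty : List (String × Int)) (user_data : List (String × Int)) : Prop :=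
  (user_data.map (·.1)).Nodup
instance (empty : List (String × Int)) (user_data : List (String × Int)) : Decidable (Pre_dict_to_dict_py empty user_data) := by unfold Pre_dict_to_dict_py; infer_instance

def pvWitness_dict_to_dict_py : (List (String × Int)) × (List (String × Int)) :=
  ([("d1", 7)], [("d2", 5), ("x", 1), ("d1", -3)])

def Spec_dict_to_dict_py (empty : List (String × Int)) (user_data : List (String × Int)) (out : List (String × Int)) : Prop := out = dict_to_dict_py_alt empty user_data
instance (empty : List (String × Int)) (user_data : List (String × Int)) (out : List (String × Int)) : Decidable (Spec_dict_to_dict_py empty user_data out) := by unfold Spec_dict_to_dict_py; infer_instance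

-- ===== CLAIM (what is proved, stated in full; the proofs are below) =====
def Claim_equal_dict_to_dict_py : Prop := ∀ (empty : List (String × Int)) (user_data : List (String × Int)), Dom_dict_to_dict_py empty user_data → Pre_dict_to_dict_py empty user_data → Spec_dict_to_dict_py empty user_data (dict_to_dict_py empty user_data)

-- ===== LEMMAS AND PROOFS =====

-- Chars between '1' and '9' are exactly the nine digit literals.
theorem pv_char_eq (b c : Char) (h : b.toNat = c.toNat) : b = c :=
  Char.ext (UInt32.toNat_inj.mp h)

theorem pv_char19 (b : Char) (h1 : '1' ≤ b) (h2 : b ≤ '9') :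
    b = '1' ∨ b = '2' ∨ b = '3' ∨ b = '4' ∨ b = '5' ∨ b = '6' ∨ b = '7' ∨ b = '8' ∨ b = '9' := by
  have h1' : 49 ≤ b.toNat := h1
  have h2' : b.toNat ≤ 57 := h2
  rcases (by omega :
      b.toNat = 49 ∨ b.toNat = 50 ∨ b.toNat = 51 ∨ b.toNat = 52 ∨ b.toNat = 53 ∨
      b.toNat = 54 ∨ b.toNat = 55 ∨ b.toNat = 56 ∨ b.toNat = 57) with
    h | h | h | h | h | h | h | h | h
  · exact Or.inl (pv_char_eq b '1' h)
  · exact Or.inr (Or.inl (pv_char_eq b '2' h))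
  · exact Or.inr (Or.inr (Or.inl (pv_char_eq b '3' h)))
  · exact Or.inr (Or.inr (Or.inr (Or.inl (pv_char_eq b '4' h))))
  · exact Or.inr (Or.inr (Or.inr (Or.inr (Or.inl (pv_char_eq b '5' h)))))
  · exact Or.inr (Or.inr (Or.inr (Or.inr (Or.inr (Or.inl (pv_char_eq b '6' h))))))
  · exact Or.inr (Or.inr (Or.inr (Or.inr (Or.inr (Or.inr (Or.inl (pv_char_eq b '7' h)))))))
  · exact Or.inr (Or.inr (Or.inr (Or.inr (Or.inr (Or.inr (Or.inr (Or.inl (pv_char_eq b '8' h))))))))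
  · exact Or.inr (Or.inr (Or.inr (Or.inr (Or.inr (Or.inr (Or.inr (Or.inr (pv_char_eq b '9' h))))))))

theorem pv_char04 (b : Char) (h1 : '0' ≤ b) (h2 : b ≤ '4') :
    b = '0' ∨ b = '1' ∨ b = '2' ∨ b = '3' ∨ b = '4' := by
  have h1' : 48 ≤ b.toNat := h1
  have h2' : b.toNat ≤ 52 := h2
  rcases (by omega :
      b.toNat = 48 ∨ b.toNat = 49 ∨ b.toNat = 50 ∨ b.toNat = 51 ∨ b.toNat = 52) with
    h | h | h | h | h
  · exact Or.inl (pv_char_eq b '0' h)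
  · exact Or.inr (Or.inl (pv_char_eq b '1' h))
  · exact Or.inr (Or.inr (Or.inl (pv_char_eq b '2' h)))
  · exact Or.inr (Or.inr (Or.inr (Or.inl (pv_char_eq b '3' h))))
  · exact Or.inr (Or.inr (Or.inr (Or.inr (pv_char_eq b '4' h))))

-- B's O(1) shape test decides exactly membership in A's whitelist, on every string.
theorem pvIsDn_eq (key : String) : pvIsDn key = decide (key ∈ pvWhitelist) := by
  have hl : ∀ (t : String), (key = t) = (key.toList = t.toList) := fun t => by
    simp [String.toList_inj]
  rcases hk : key.toList with _ | ⟨a, _ | ⟨b, _ | ⟨c, _ | ⟨d, t⟩⟩⟩⟩ <;>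
    simp [pvIsDn, pvWhitelist, PySem.Str.len, PySem.Str.pyGet?, PySem.Chars.pyGet?,
      PySem.List.pyGet?, PySem.List.pyIdx?, hk, hl]
  · -- length-2 strings: 'd' + digit 1..9
    rw [Bool.eq_iff_iff]
    simp only [Bool.and_eq_true, Bool.or_eq_true, beq_iff_eq, decide_eq_true_eq]
    constructor
    · rintro ⟨⟨rfl, h1⟩, h2⟩
      rcases pv_char19 b h1 h2 with h | h | h | h | h | h | h | h | h <;> simp [h]
    · rintro (⟨rfl, rfl⟩ | ⟨rfl, rfl⟩ | ⟨rfl, rfl⟩ | ⟨rfl, rfl⟩ | ⟨rfl, rfl⟩ |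
        ⟨rfl, rfl⟩ | ⟨rfl, rfl⟩ | ⟨rfl, rfl⟩ | ⟨rfl, rfl⟩) <;> simp
  · -- length-3 strings: 'd' + '1' + digit 0..4
    rw [Bool.eq_iff_iff]
    simp only [Bool.and_eq_true, Bool.or_eq_true, beq_iff_eq, decide_eq_true_eq]
    constructor
    · rintro ⟨⟨⟨rfl, rfl⟩, h1⟩, h2⟩
      rcases pv_char04 c h1 h2 with h | h | h | h | h <;> simp [h]
    · rintro (⟨rfl, rfl, rfl⟩ | ⟨rfl, rfl, rfl⟩ | ⟨rfl, rfl, rfl⟩ |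
        ⟨rfl, rfl, rfl⟩ | ⟨rfl, rfl, rfl⟩) <;> simp
  · -- length ≥ 4: both sides false
    rw [if_neg (by omega)]
    intro h3
    exact absurd h3 (by omega)

-- The deletion loop over a key list is a filter of the items: keys the loop keeps survive.
theorem pv_prune_items (ks : List String) (d : PySem.Dict String Int) :
    (ks.foldl (fun d k => if pvIsDn k then d else d.erase k) d).items
      = d.items.filter (fun p => pvIsDn p.1 || !(ks.contains p.1)) := by
  induction ks generalizing d with
  | nil => simp
  | cons k t ih =>
    by_cases h : pvIsDn k
    · rw [List.foldl_cons, if_pos h, ih]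
      apply List.filter_congr
      intro p hp
      by_cases hpk : p.1 = k
      · simp [hpk, h]
      · simp [hpk]
    · rw [List.foldl_cons, if_neg h, ih]
      simp only [PySem.Dict.erase, List.filter_filter]
      apply List.filter_congr
      intro p hp
      by_cases hpk : p.1 = k
      · simp [hpk, h]
      · simp [hpk]

-- B reduces to folding the whitelist-filtered pair list into `empty` by single inserts.
theorem pv_alt_eq_foldl (empty user_data : List (String × Int)) :
    dict_to_dict_py_alt empty user_data =
      ((user_data.filter (fun p => decide (p.1 ∈ pvWhitelist))).foldl
        (fun d p => d.insert p.1 p.2) (PySem.Dict.mk empty)).items := by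
  simp only [dict_to_dict_py_alt, pv_prune_items, PySem.Dict.update]
  have hfilter :
      user_data.filter
        (fun p => pvIsDn p.1 || !((PySem.Dict.mk user_data).keys.contains p.1))
      = user_data.filter (fun p => decide (p.1 ∈ pvWhitelist)) := by
    apply List.filter_congr
    intro p hp
    have hmem : (PySem.Dict.mk user_data).keys.contains p.1 = true := by
      simp only [PySem.Dict.keys, List.contains_iff_mem, List.mem_map]
      exact ⟨p, hp, rfl⟩
    rw [pvIsDn_eq, hmem]
    simp
  exact congrArg _ (congrArg _ hfilter)

-- A reduces to the same fold: the key loop with the fixed-dict lookup is the pair loop.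
theorem pv_a_eq_foldl (empty user_data : List (String × Int))
    (hN : (user_data.map (·.1)).Nodup) :
    dict_to_dict_py empty user_data =
      ((user_data.filter (fun p => decide (p.1 ∈ pvWhitelist))).foldl
        (fun d p => d.insert p.1 p.2) (PySem.Dict.mk empty)).items := by
  unfold dict_to_dict_py
  rw [PySem.Dict.keys, List.foldl_map]
  rw [PySem.List.foldl_congr_mem user_data
      (fun d p => if p.1 ∈ pvWhitelist then d.insert p.1 ((PySem.Dict.mk user_data).getD p.1 0) else d)
      (fun d p => if decide (p.1 ∈ pvWhitelist) then d.insert p.1 p.2 else d)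
      (PySem.Dict.mk empty) ?_]
  · rw [← List.foldl_filter]
  · intro acc p hp
    have hget : (PySem.Dict.mk user_data).getD p.1 0 = p.2 :=
      PySem.Dict.getD_of_mem_items (PySem.Dict.mk user_data) hp hN 0
    simp [hget]

-- ===== VERDICT (by name: the statement is the Claim_ definition above) =====
theorem dict_to_dict_py_spec : Claim_equal_dict_to_dict_py := by
  intro empty user_data _hDom hPre
  unfold Spec_dict_to_dict_py
  rw [pv_a_eq_foldl empty user_data hPre, pv_alt_eq_foldl empty user_data]
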